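-- pv_equiv track=rewrite | github.com/bigbigwatermalon/FinSQL | Hybrid_Data_Augmentation/src/utils/templates.py | find_outermost_parentheses
-- ===== SOURCE A (Python) =====
-- def find_outermost_parentheses(text):
--     left_index = -1
--     right_index = -1
--     inner_text = ""
--
--     for i, char in enumerate(text):
--         if char == '(':
--             left_index = i
--             break
--     for i, char in enumerate(text[::-1]):
--         if char == ')':
--             right_index = len(text) - i - 1
--             break
--
--     if left_index != -1 and right_index != -1:
--         inner_text = text[left_index + 1:right_index]
--
--     return left_index, right_index, inner_text
-- ===== SOURCE B (Python) =====
-- def find_outermost_parentheses(text):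
--     left_index = -1
--     right_index = -1
--     for i, char in enumerate(text):
--         if left_index == -1 and char == '(':
--             left_index = i
--         if char == ')':
--             right_index = i
--     inner_text = ""
--     if left_index != -1 and right_index != -1:
--         inner_text = text[left_index + 1:right_index]
--     return left_index, right_index, inner_text
-- ===== Notes on version B (the rewrite author's own statement) =====
-- stated objective: alternative
-- what changed: Replaces A's two scans (a forward scan for the first '(' plus a scan over the reversed copy for the last ')') with one forward pass maintaining both running indices, with no reversed copy.
import Mathlib
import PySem

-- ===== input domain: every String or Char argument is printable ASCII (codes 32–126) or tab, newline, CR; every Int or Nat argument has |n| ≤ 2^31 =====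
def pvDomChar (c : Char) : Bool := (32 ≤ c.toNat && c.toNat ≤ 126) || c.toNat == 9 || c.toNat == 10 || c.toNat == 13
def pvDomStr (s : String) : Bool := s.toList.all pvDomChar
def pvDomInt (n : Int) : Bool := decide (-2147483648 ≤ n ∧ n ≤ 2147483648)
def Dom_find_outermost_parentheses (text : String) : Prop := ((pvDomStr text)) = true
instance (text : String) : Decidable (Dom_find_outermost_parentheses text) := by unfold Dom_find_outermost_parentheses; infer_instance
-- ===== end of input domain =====

-- B replaces A's two scans (forward for the first '(', over a reversed copy for the last ')')
-- with one forward pass maintaining both running indices; same return value (objective: alternative).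

-- ===== PORT A =====
-- first loop of A: first index holding '(' (counter i), else -1
def fopFirst : List Char → Int → Int
  | [], _ => -1
  | c :: rest, i => if c = '(' then i else fopFirst rest (i + 1)

-- second loop of A: scan of text[::-1] with counter i, returning n - i - 1 at the first ')'
def fopLast (n : Int) : List Char → Int → Int
  | [], _ => -1
  | c :: rest, i => if c = ')' then n - i - 1 else fopLast n rest (i + 1)

def find_outermost_parentheses (text : String) : Int × Int × String :=
  let cs := text.toList
  let left_index := fopFirst cs 0
  let right_index := fopLast (cs.length : Int) cs.reverse 0
  let inner_text :=
    if left_index ≠ -1 ∧ right_index ≠ -1 then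
      String.ofList (PySem.List.slice cs (some (left_index + 1)) (some right_index))
    else ""
  (left_index, right_index, inner_text)

-- ===== PORT B =====
-- B's single forward loop: left set only while still -1, right overwritten on every ')'
def fopLoop : List Char → Int → Int → Int → Int × Int
  | [], _, l, r => (l, r)
  | c :: rest, i, l, r =>
      fopLoop rest (i + 1) (if l = -1 ∧ c = '(' then i else l) (if c = ')' then i else r)

def find_outermost_parentheses_alt (text : String) : Int × Int × String :=
  let cs := text.toList
  let lr := fopLoop cs 0 (-1) (-1)
  let left_index := lr.1
  let right_index := lr.2
  let inner_text :=
    if left_index ≠ -1 ∧ right_index ≠ -1 then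
      String.ofList (PySem.List.slice cs (some (left_index + 1)) (some right_index))
    else ""
  (left_index, right_index, inner_text)

-- ===== PRECONDITION & SPEC =====
def Spec_find_outermost_parentheses (text : String) (out : Int × Int × String) : Prop := out = find_outermost_parentheses_alt text
instance (text : String) (out : Int × Int × String) : Decidable (Spec_find_outermost_parentheses text out) := by unfold Spec_find_outermost_parentheses; infer_instance

-- ===== CLAIM (what is proved, stated in full; the proofs are below) =====
def Claim_equal_find_outermost_parentheses : Prop := ∀ (text : String), Dom_find_outermost_parentheses text → Spec_find_outermost_parentheses text (find_outermost_parentheses text)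

-- ===== LEMMAS AND PROOFS =====

theorem fopLoop_fst (cs : List Char) (i l r : Int) (hi : 0 ≤ i) :
    (fopLoop cs i l r).1 = if l = -1 then fopFirst cs i else l := by
  induction cs generalizing i l r with
  | nil => simp [fopLoop, fopFirst]
  | cons c rest ih =>
    simp only [fopLoop, fopFirst]
    by_cases hl : l = -1
    · by_cases hc : c = '('
      · rw [ih _ _ _ (by omega)]
        simp [hl, hc]
        omega
      · rw [ih _ _ _ (by omega)]
        simp [hl, hc]
    · rw [ih _ _ _ (by omega)]
      simp [hl]

theorem fopLoop_append (xs ys : List Char) (i l r : Int) :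
    fopLoop (xs ++ ys) i l r =
      fopLoop ys (i + xs.length) (fopLoop xs i l r).1 (fopLoop xs i l r).2 := by
  induction xs generalizing i l r with
  | nil => simp [fopLoop]
  | cons x xs ih =>
    simp only [List.cons_append, fopLoop, ih, List.length_cons]
    congr 1
    push_cast
    ring

theorem fopLoop_snd_snoc (xs : List Char) (c : Char) (i l r : Int) :
    (fopLoop (xs ++ [c]) i l r).2 =
      if c = ')' then i + xs.length else (fopLoop xs i l r).2 := by
  rw [fopLoop_append]
  by_cases hc : c = ')' <;> simp [fopLoop, hc]

theorem fopLast_shift (n : Int) (ys : List Char) (j : Int) :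
    fopLast (n + 1) ys (j + 1) = fopLast n ys j := by
  induction ys generalizing j with
  | nil => simp [fopLast]
  | cons y ys ih =>
    simp only [fopLast]
    split_ifs with hy
    · omega
    · exact ih (j + 1)

theorem fopLoop_snd (cs : List Char) :
    (fopLoop cs 0 (-1) (-1)).2 = fopLast (cs.length : Int) cs.reverse 0 := by
  induction cs using List.reverseRecOn with
  | nil => simp [fopLoop, fopLast]
  | append_singleton xs c ih =>
    rw [fopLoop_snd_snoc]
    by_cases hc : c = ')'
    · simp [hc, fopLast, List.reverse_append]
    · rw [if_neg hc, ih]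
      have h : ((xs ++ [c]).length : Int) = (xs.length : Int) + 1 := by simp
      rw [h]
      have hrev : (xs ++ [c]).reverse = c :: xs.reverse := by simp
      rw [hrev]
      simp only [fopLast, if_neg hc]
      exact (fopLast_shift (xs.length : Int) xs.reverse 0).symm

-- ===== VERDICT (by name: the statement is the Claim_ definition above) =====
theorem fopLoop_eq (cs : List Char) :
    fopLoop cs 0 (-1) (-1) = (fopFirst cs 0, fopLast (cs.length : Int) cs.reverse 0) := by
  have h1 := fopLoop_fst cs 0 (-1) (-1) (by omega)
  have h2 := fopLoop_snd cs
  rw [if_pos rfl] at h1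
  exact Prod.ext h1 h2

theorem find_outermost_parentheses_spec : Claim_equal_find_outermost_parentheses := by
  intro text _
  unfold Spec_find_outermost_parentheses find_outermost_parentheses find_outermost_parentheses_alt
  simp only [fopLoop_eq]
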